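-- pv_equiv track=rewrite | github.com/ilie-gavril/Python_practices | Tema8/spanzuratoarea/functii.py | mascare_cuvant
-- ===== SOURCE A (Python) =====
-- def mascare_cuvant(cuvant):
--         litere_cuvant = []
--         cuvant_mascat = []
--         for caracter in cuvant:
--             litere_cuvant.append(caracter)
--         for x in range(0, len(litere_cuvant)):
--             if x == 0 or x == (len(litere_cuvant)-1):
--                 cuvant_mascat.append(litere_cuvant[x])
--             else:
--                 cuvant_mascat.append("_")
--         return cuvant_mascat
-- ===== SOURCE B (Python) =====
-- def mascare_cuvant(cuvant):
--     n = len(cuvant)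
--     if n <= 1:
--         return list(cuvant)
--     return [cuvant[0]] + ["_"] * (n - 2) + [cuvant[-1]]
-- ===== Notes on version B (the rewrite author's own statement) =====
-- stated objective: simpler
-- what changed: Replaces the char-copy loop and the per-index branching loop with a closed-form construction: first char, then n-2 underscores built by list multiplication, then the last char, with list(cuvant) for the degenerate short cases.
import Mathlib
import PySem

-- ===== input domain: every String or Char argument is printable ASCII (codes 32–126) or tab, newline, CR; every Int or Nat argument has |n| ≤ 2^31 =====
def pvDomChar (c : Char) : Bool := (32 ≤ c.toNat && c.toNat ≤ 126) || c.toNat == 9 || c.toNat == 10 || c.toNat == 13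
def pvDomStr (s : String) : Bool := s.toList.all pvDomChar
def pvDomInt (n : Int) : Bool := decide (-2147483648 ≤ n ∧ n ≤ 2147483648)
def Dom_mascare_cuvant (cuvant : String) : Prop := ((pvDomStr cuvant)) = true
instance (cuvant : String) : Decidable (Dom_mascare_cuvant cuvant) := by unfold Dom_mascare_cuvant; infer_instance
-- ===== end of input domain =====

-- B replaces A's char-copy loop and per-index branching loop with the closed form
-- first char ++ '_' * (n-2) ++ last char (objective: simpler).

-- ===== PORT A =====
def mascare_cuvant (cuvant : String) : List String :=
  let litere_cuvant : List String :=
    cuvant.toList.foldl (fun acc caracter => acc ++ [String.ofList [caracter]]) []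
  let cuvant_mascat : List String :=
    (PySem.List.pyRange 0 (PySem.List.len litere_cuvant) 1).foldl (fun acc x =>
      if x == 0 || x == PySem.List.len litere_cuvant - 1 then
        acc ++ [PySem.List.pyGetD litere_cuvant x ""]
      else
        acc ++ ["_"]) []
  cuvant_mascat

-- ===== PORT B =====
def mascare_cuvant_alt (cuvant : String) : List String :=
  let cs := cuvant.toList
  let n := cs.length
  if n ≤ 1 then cs.map (fun c => String.ofList [c])
  else
    [String.ofList [PySem.List.pyGetD cs 0 ' ']] ++ List.replicate (n - 2) "_"
      ++ [String.ofList [PySem.List.pyGetD cs (-1) ' ']]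

-- ===== PRECONDITION & SPEC =====
def Spec_mascare_cuvant (cuvant : String) (out : List String) : Prop := out = mascare_cuvant_alt cuvant
instance (cuvant : String) (out : List String) : Decidable (Spec_mascare_cuvant cuvant out) := by unfold Spec_mascare_cuvant; infer_instance

-- ===== CLAIM (what is proved, stated in full; the proofs are below) =====
def Claim_equal_mascare_cuvant : Prop := ∀ (cuvant : String), Dom_mascare_cuvant cuvant → Spec_mascare_cuvant cuvant (mascare_cuvant cuvant)

-- ===== LEMMAS AND PROOFS =====

lemma foldl_ite_append {α β : Type} (l : List α) (p : α → Bool) (f g : α → β) (acc : List β) :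
    l.foldl (fun acc x => if p x then acc ++ [f x] else acc ++ [g x]) acc
      = acc ++ l.map (fun x => if p x then f x else g x) := by
  induction l generalizing acc with
  | nil => simp
  | cons a l ih => simp only [List.foldl_cons, List.map_cons]; split <;> simp [ih]

lemma main_list (cs : List Char) :
    (PySem.List.pyRange 0 (PySem.List.len (cs.map (fun c => String.ofList [c]))) 1).foldl
      (fun acc x =>
        if x == 0 || x == PySem.List.len (cs.map (fun c => String.ofList [c])) - 1 then
          acc ++ [PySem.List.pyGetD (cs.map (fun c => String.ofList [c])) x ""]
        else acc ++ ["_"]) []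
    = (if cs.length ≤ 1 then cs.map (fun c => String.ofList [c])
       else [String.ofList [PySem.List.pyGetD cs 0 ' ']] ++ List.replicate (cs.length - 2) "_"
         ++ [String.ofList [PySem.List.pyGetD cs (-1) ' ']]) := by
  simp only [PySem.List.len_eq, List.length_map]
  rw [PySem.List.pyRange_zero_natCast, List.foldl_map, foldl_ite_append, List.nil_append]
  match cs with
  | [] => simp
  | [c] => simp [List.range_succ]
  | c :: d :: t =>
    rw [if_neg (by simp)]
    rw [PySem.List.pyGetD_zero, PySem.List.pyGetD_neg_ofNat (c :: d :: t) 1 ' ' (by omega) (by simp)]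
    have hlen : (c :: d :: t).length = t.length + 2 := by simp
    simp only [hlen]
    have hrange : List.range (t.length + 2)
        = 0 :: (List.range' 1 t.length ++ [1 + t.length]) := by
      rw [List.range_eq_range', List.range'_succ, ← List.range'_1_concat]
    rw [hrange]
    simp only [List.map_cons, List.map_append]
    have hmid : (List.range' 1 t.length).map (fun (x : Nat) =>
        if ((x : Int) == 0 || (x : Int) == ((t.length + 2 : Nat) : Int) - 1) = true then
          PySem.List.pyGetD (String.ofList [c] :: String.ofList [d]
            :: t.map (fun c => String.ofList [c])) (x : Int) ""
        else "_") = List.replicate t.length "_" := by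
      rw [List.eq_replicate_iff]
      refine ⟨by simp, ?_⟩
      intro b hb
      rw [List.mem_map] at hb
      obtain ⟨k, hk, hbk⟩ := hb
      rw [List.mem_range'] at hk
      rw [if_neg (by simp only [beq_iff_eq, Bool.or_eq_true]; push_cast; omega)] at hbk
      exact hbk.symm
    rw [hmid]
    have hF0 : (((0:Nat) : Int) == 0 || ((0:Nat) : Int) == ((t.length + 2 : Nat) : Int) - 1) = true := by simp
    have hFl : (((1 + t.length : Nat) : Int) == 0 || ((1 + t.length : Nat) : Int) == ((t.length + 2 : Nat) : Int) - 1) = true := by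
      simp only [beq_iff_eq, Bool.or_eq_true]; push_cast; omega
    simp only [if_pos hF0, if_pos hFl, PySem.List.pyGetD_natCast]
    simp only [List.cons_append, List.nil_append]
    have helem : (String.ofList [c] :: String.ofList [d]
        :: List.map (fun c => String.ofList [c]) t).getD (1 + t.length) ""
        = String.ofList [(c :: d :: t)[t.length + 2 - 1]] := by
      rw [show 1 + t.length = t.length + 2 - 1 by omega]
      rw [show (String.ofList [c] :: String.ofList [d] :: List.map (fun c => String.ofList [c]) t)
            = (c :: d :: t).map (fun c => String.ofList [c]) from rfl]
      rw [List.getD_eq_getElem _ _ (by simp), List.getElem_map]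
    simp only [List.map_nil]
    rw [helem, show t.length + 2 - 2 = t.length by omega]
    rfl

theorem mascare_main (cuvant : String) :
    mascare_cuvant cuvant = mascare_cuvant_alt cuvant := by
  unfold mascare_cuvant mascare_cuvant_alt
  have h := PySem.List.foldl_append_singleton_eq_map
    (f := fun c => String.ofList [c]) (l := cuvant.toList) (acc := ([] : List String))
  simp only [List.nil_append] at h
  simp only [h]
  exact main_list cuvant.toList

-- ===== VERDICT (by name: the statement is the Claim_ definition above) =====
theorem mascare_cuvant_spec : Claim_equal_mascare_cuvant := by
  intro cuvant _
  unfold Spec_mascare_cuvant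
  exact mascare_main cuvant
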